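-- pv_equiv track=rewrite | github.com/Egor53510/Pet-Projects | Algorithm Training 5.0 Lesson 3/Replacing words.py | simplify_text
-- ===== SOURCE A (Python) =====
-- def simplify_text(vocab: set, words: list) -> str:
--     ans = []
--     for w in words:
--         for j in range(1, len(w)):
--             if w[:j] in vocab:
--                 ans.append(w[:j])
--                 break
--         else:
--             ans.append(w)
--     return " ".join(ans)
-- ===== SOURCE B (Python) =====
-- def simplify_text(vocab: set, words: list) -> str:
--     # Try only prefix lengths that actually occur in the vocabulary, shortest first.
--     lens = sorted(set(len(v) for v in vocab))
--     out = []
--     for w in words: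
--         res = w
--         for L in lens:
--             if L >= len(w):
--                 break
--             if L > 0 and w[:L] in vocab:
--                 res = w[:L]
--                 break
--         out.append(res)
--     return " ".join(out)
-- ===== Notes on version B (the rewrite author's own statement) =====
-- stated objective: alternative
-- what changed: Instead of testing every prefix length 1..len(w)-1 per word, B precomputes the sorted set of distinct vocabulary word lengths once and, for each word, probes only those lengths in ascending order with an early break once lengths reach len(w); the shortest matching prefix is the same because a successful prefix length must be the length of some vocabulary word.
import Mathlib
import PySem

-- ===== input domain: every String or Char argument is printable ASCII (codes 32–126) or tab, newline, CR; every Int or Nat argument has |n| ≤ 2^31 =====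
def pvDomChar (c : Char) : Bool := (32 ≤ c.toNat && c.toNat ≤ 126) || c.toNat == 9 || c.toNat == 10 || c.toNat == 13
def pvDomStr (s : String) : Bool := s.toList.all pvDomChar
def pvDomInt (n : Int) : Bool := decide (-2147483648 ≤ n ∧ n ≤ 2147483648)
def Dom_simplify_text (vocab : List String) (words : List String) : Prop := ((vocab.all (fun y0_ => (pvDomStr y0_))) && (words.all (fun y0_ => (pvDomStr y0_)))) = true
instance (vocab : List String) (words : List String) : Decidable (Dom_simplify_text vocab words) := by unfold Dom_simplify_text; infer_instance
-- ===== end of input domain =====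

-- B replaces the per-word scan of ALL prefix lengths by a scan of only the distinct
-- vocabulary word lengths, sorted ascending once, with an early break at len(w).

-- ===== PORT A =====
-- inner 'for j in range(1, len(w)): if w[:j] in vocab: return w[:j] (break)  else: w'
def pvAFind (vocab : List String) (w : String) : List Int → String
  | [] => w
  | j :: rest =>
    if vocab.contains (PySem.Str.slice w none (some j)) then
      PySem.Str.slice w none (some j)
    else pvAFind vocab w rest

def simplify_text (vocab : List String) (words : List String) : String :=
  PySem.Str.join " "
    (words.foldl (fun ans w => ans ++ [pvAFind vocab w (PySem.List.pyRange 1 (PySem.Str.len w) 1)]) [])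

-- ===== PORT B =====
-- lens = sorted(set(len(v) for v in vocab))
def pvBLens (vocab : List String) : List Int :=
  PySem.List.sorted (PySem.Set.ofList (vocab.map PySem.Str.len)) (fun L => L) false

-- inner 'for L in lens: if L >= len(w): break; if L > 0 and w[:L] in vocab: res = w[:L]; break'
def pvBFind (vocab : List String) (w : String) : List Int → String
  | [] => w
  | L :: rest =>
    if PySem.Str.len w ≤ L then w
    else if 0 < L ∧ vocab.contains (PySem.Str.slice w none (some L)) = true then
      PySem.Str.slice w none (some L)
    else pvBFind vocab w rest

def simplify_text_alt (vocab : List String) (words : List String) : String :=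
  PySem.Str.join " " (words.map (fun w => pvBFind vocab w (pvBLens vocab)))

-- ===== PRECONDITION & SPEC =====
def Spec_simplify_text (vocab : List String) (words : List String) (out : String) : Prop := out = simplify_text_alt vocab words
instance (vocab : List String) (words : List String) (out : String) : Decidable (Spec_simplify_text vocab words out) := by unfold Spec_simplify_text; infer_instance

-- ===== CLAIM (what is proved, stated in full; the proofs are below) =====
def Claim_equal_simplify_text : Prop := ∀ (vocab : List String) (words : List String), Dom_simplify_text vocab words → Spec_simplify_text vocab words (simplify_text vocab words)

-- ===== LEMMAS AND PROOFS =====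

-- the lengths j at which a replacement may fire, as a Bool predicate on j
def pvHit (vocab : List String) (w : String) (j : Int) : Bool :=
  decide (0 < j) && decide (j < PySem.Str.len w) && vocab.contains (PySem.Str.slice w none (some j))

-- turn an optional found length into the word's result
def pvRes (w : String) (o : Option Int) : String :=
  match o with
  | some j => PySem.Str.slice w none (some j)
  | none => w

lemma pvBLens_pairwise (vocab : List String) : (pvBLens vocab).Pairwise (· < ·) := by
  unfold pvBLens
  exact PySem.List.sorted_ofList_pairwise_lt (vocab.map PySem.Str.len)

lemma pvAFind_eq_find (vocab : List String) (w : String) (l : List Int)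
    (h : ∀ j ∈ l, 0 < j ∧ j < PySem.Str.len w) :
    pvAFind vocab w l = pvRes w (l.find? (pvHit vocab w)) := by
  induction l with
  | nil => rfl
  | cons j rest ih =>
    obtain ⟨h1, h2⟩ := h j (by simp)
    have h2' : j < (w.length : Int) := by simpa using h2
    by_cases hm : PySem.Str.slice w none (some j) ∈ vocab
    · have hhit : pvHit vocab w j = true := by simp [pvHit, h1, h2', hm]
      simp [pvAFind, hhit, hm, pvRes]
    · have hhit : pvHit vocab w j = false := by simp [pvHit, hm]
      simp [pvAFind, hhit, hm,
        ih (fun x hx => h x (List.mem_cons_of_mem _ hx))]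

lemma pvBFind_eq_find (vocab : List String) (w : String) (l : List Int)
    (hs : l.Pairwise (· < ·)) :
    pvBFind vocab w l = pvRes w (l.find? (pvHit vocab w)) := by
  induction l with
  | nil => rfl
  | cons L rest ih =>
    rcases List.pairwise_cons.mp hs with ⟨hLrest, hrest⟩
    by_cases hbig : PySem.Str.len w ≤ L
    · -- break: no element of L :: rest can hit
      have hnone : (L :: rest).find? (pvHit vocab w) = none := by
        rw [List.find?_eq_none]
        intro x hx
        have hxge : L ≤ x := by
          rcases List.mem_cons.mp hx with rfl | hx'
          · exact le_refl _
          · exact (hLrest x hx').le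
        have hbigx : ¬ (x < (w.length : Int)) := by
          simpa using not_lt.mpr (le_trans hbig hxge)
        simp [pvHit, hbigx]
      have hbig' : ((w.length : Int) ≤ L) := by simpa using hbig
      simp [pvBFind, hbig', hnone, pvRes]
    · have hbig' : ¬ ((w.length : Int) ≤ L) := by simpa using hbig
      have hlt' : L < (w.length : Int) := not_le.mp hbig'
      by_cases hc : 0 < L ∧ PySem.Str.slice w none (some L) ∈ vocab
      · have hhit : pvHit vocab w L = true := by simp [pvHit, hc.1, hlt', hc.2]
        simp [pvBFind, hbig', hc, hhit, pvRes]
      · have hhit : pvHit vocab w L = false := by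
          rcases Decidable.not_and_iff_not_or_not.mp hc with h0 | hv
          · simp [pvHit, h0]
          · simp [pvHit, hv]
        simp [pvBFind, hbig', hc, hhit, ih hrest]

-- a hit length is the length of some vocabulary word
lemma pvHit_mem_lens (vocab : List String) (w : String) (j : Int) (h : pvHit vocab w j = true) :
    j ∈ pvBLens vocab := by
  simp only [pvHit, Bool.and_eq_true, decide_eq_true_eq] at h
  obtain ⟨⟨h0, hlen⟩, hmem⟩ := h
  have hmem' : PySem.Str.slice w none (some j) ∈ vocab := by simpa using hmem
  have hslen : PySem.Str.len (PySem.Str.slice w none (some j)) = j := by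
    rw [PySem.Str.len_eq] at hlen
    rw [PySem.Str.len_eq, PySem.Str.toList_slice,
      show PySem.Chars.slice w.toList none (some j) = w.toList.take j.toNat from
        PySem.List.slice_to w.toList h0.le,
      List.length_take]
    omega
  unfold pvBLens
  rw [PySem.List.mem_sorted, PySem.Set.mem_ofList]
  exact List.mem_map.mpr ⟨_, hmem', hslen⟩

-- the two candidate lists find the same first hit
lemma pvFind_eq (vocab : List String) (w : String) :
    (PySem.List.pyRange 1 (PySem.Str.len w) 1).find? (pvHit vocab w)
      = (pvBLens vocab).find? (pvHit vocab w) := by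
  have hpr : (PySem.List.pyRange 1 (PySem.Str.len w) 1).Pairwise (· < ·) :=
    PySem.List.pairwise_lt_pyRange_one 1 (PySem.Str.len w)
  have hbl : (pvBLens vocab).Pairwise (· < ·) := pvBLens_pairwise vocab
  rw [← List.head?_filter, ← List.head?_filter]
  congr 1
  have hmem : ∀ x, x ∈ (PySem.List.pyRange 1 (PySem.Str.len w) 1).filter (pvHit vocab w)
      ↔ x ∈ (pvBLens vocab).filter (pvHit vocab w) := by
    intro x
    simp only [List.mem_filter]
    constructor
    · rintro ⟨-, hhit⟩
      exact ⟨pvHit_mem_lens vocab w x hhit, hhit⟩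
    · rintro ⟨-, hhit⟩
      refine ⟨PySem.List.mem_pyRange_one.mpr ?_, hhit⟩
      have hb := hhit
      simp only [pvHit, Bool.and_eq_true, decide_eq_true_eq] at hb
      exact ⟨by omega, hb.1.2⟩
  have h1 := List.Pairwise.filter (R := (· < ·)) (pvHit vocab w) hpr
  have h2 := List.Pairwise.filter (R := (· < ·)) (pvHit vocab w) hbl
  have hnd1 : ((PySem.List.pyRange 1 (PySem.Str.len w) 1).filter (pvHit vocab w)).Nodup :=
    h1.imp ne_of_lt
  have hnd2 : ((pvBLens vocab).filter (pvHit vocab w)).Nodup := h2.imp ne_of_lt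
  have hperm := (List.perm_ext_iff_of_nodup hnd1 hnd2).mpr hmem
  exact hperm.eq_of_pairwise (fun a b _ _ hab hba => absurd hba (not_lt.mpr hab.le)) h1 h2

lemma pvWord_eq (vocab : List String) (w : String) :
    pvAFind vocab w (PySem.List.pyRange 1 (PySem.Str.len w) 1)
      = pvBFind vocab w (pvBLens vocab) := by
  rw [pvAFind_eq_find vocab w _ (fun j hj => by
        rcases PySem.List.mem_pyRange_one.mp hj with ⟨hj1, hj2⟩
        exact ⟨by omega, hj2⟩),
      pvBFind_eq_find vocab w _ (pvBLens_pairwise vocab),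
      pvFind_eq]

-- ===== VERDICT (by name: the statement is the Claim_ definition above) =====
theorem simplify_text_spec : Claim_equal_simplify_text := by
  intro vocab words _
  unfold Spec_simplify_text simplify_text simplify_text_alt
  rw [PySem.List.foldl_append_singleton_eq_map, List.nil_append]
  congr 1
  exact List.map_congr_left (fun w _ => pvWord_eq vocab w)
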